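-- pv_equiv track=rewrite | github.com/blakelawyer/genrejinn | epub_parser.py | _count_notes_under_mark
-- ===== SOURCE A (Python) =====
-- def _count_notes_under_mark(mark, all_items) -> int:
--     """Count how many notes are controlled by this mark."""
--     mark_page, mark_row, mark_col = mark[0], mark[1], mark[2]
--     mark_pos = (mark_page, mark_row, mark_col)
--
--     # Find the next mark after this one
--     next_mark_pos = None
--     for item in all_items:
--         if item[0] == 'mark':
--             other_mark_page, other_mark_row, other_mark_col = item[1], item[2], item[3]
--             other_mark_pos = (other_mark_page, other_mark_row, other_mark_col)
--
--             # Skip the current mark itself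
--             if other_mark_pos == mark_pos:
--                 continue
--
--             # Find first mark after current mark
--             if other_mark_pos > mark_pos:
--                 next_mark_pos = other_mark_pos
--                 break
--
--     # Count highlights that fall within this mark's scope
--     note_count = 0
--     for item in all_items:
--         if item[0] == 'highlight':
--             highlight_page, highlight_row, highlight_col = item[1], item[2], item[3]
--             highlight_pos = (highlight_page, highlight_row, highlight_col)
--
--             # Check if highlight is after this mark
--             if highlight_pos > mark_pos:
--                 # If there's a next mark, make sure highlight is before it
--                 if next_mark_pos is None or highlight_pos < next_mark_pos:
--                     note_count += 1
--
--     return note_count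
-- ===== SOURCE B (Python) =====
-- def _count_notes_under_mark(mark, all_items) -> int:
--     """Count how many notes are controlled by this mark (single pass + final count)."""
--     mark_pos = (mark[0], mark[1], mark[2])
--     highlights = []
--     next_mark_pos = None
--     for item in all_items:
--         pos = (item[1], item[2], item[3])
--         if item[0] == 'highlight' and pos > mark_pos:
--             highlights.append(pos)
--         elif item[0] == 'mark' and pos > mark_pos and next_mark_pos is None:
--             next_mark_pos = pos
--     return sum(1 for p in highlights
--                if next_mark_pos is None or p < next_mark_pos)
-- ===== Notes on version B (the rewrite author's own statement) =====
-- stated objective: alternative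
-- what changed: Replaces A's two full scans (mark search with break, then highlight-count scan) by one fused pass that collects qualifying highlight positions and latches the first later mark, followed by a final count over the collected list.
import Mathlib
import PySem

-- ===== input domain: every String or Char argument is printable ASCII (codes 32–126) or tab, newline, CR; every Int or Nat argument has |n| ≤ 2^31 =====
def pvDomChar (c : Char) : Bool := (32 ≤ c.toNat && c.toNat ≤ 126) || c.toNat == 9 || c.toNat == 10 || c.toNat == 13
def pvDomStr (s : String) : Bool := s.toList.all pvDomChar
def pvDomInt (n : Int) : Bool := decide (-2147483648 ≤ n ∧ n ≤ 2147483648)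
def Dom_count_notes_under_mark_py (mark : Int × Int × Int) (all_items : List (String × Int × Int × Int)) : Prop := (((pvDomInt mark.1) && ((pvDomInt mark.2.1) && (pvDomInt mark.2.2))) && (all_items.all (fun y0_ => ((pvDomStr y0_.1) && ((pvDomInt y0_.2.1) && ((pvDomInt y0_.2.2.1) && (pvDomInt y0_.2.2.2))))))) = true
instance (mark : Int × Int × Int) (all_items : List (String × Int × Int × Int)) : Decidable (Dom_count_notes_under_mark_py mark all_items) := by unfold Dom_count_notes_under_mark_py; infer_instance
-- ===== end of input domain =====

-- B fuses A's two scans into one pass (collect highlight positions + latch the first later mark) and counts afterwards; alternative decomposition, same cost.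

-- Python tuple '<' on (Int, Int, Int) (lexicographic), as a Bool
def pvLt (a b : Int × Int × Int) : Bool :=
  decide (a.1 < b.1 ∨ (a.1 = b.1 ∧ (a.2.1 < b.2.1 ∨ (a.2.1 = b.2.1 ∧ a.2.2 < b.2.2))))

-- ===== PORT A =====
-- first loop of A: find the first mark strictly after mark_pos (break); the '== mark_pos' continue is ported literally
def pvFindNext (mp : Int × Int × Int) : List (String × Int × Int × Int) → Option (Int × Int × Int)
  | [] => none
  | it :: rest =>
    if it.1 = "mark" then
      if it.2 = mp then pvFindNext mp rest
      else if pvLt mp it.2 then some it.2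
      else pvFindNext mp rest
    else pvFindNext mp rest

def count_notes_under_mark_py (mark : Int × Int × Int) (all_items : List (String × Int × Int × Int)) : Int :=
  let nm := pvFindNext mark all_items
  all_items.foldl (fun acc it =>
    if it.1 = "highlight" then
      if pvLt mark it.2 then
        match nm with
        | none => acc + 1
        | some n => if pvLt it.2 n then acc + 1 else acc
      else acc
    else acc) 0

-- ===== PORT B =====
-- one fused pass: accumulate qualifying highlight positions, latch the first later mark exactly once
def pvStepB (mp : Int × Int × Int) (st : List (Int × Int × Int) × Option (Int × Int × Int))
    (it : String × Int × Int × Int) : List (Int × Int × Int) × Option (Int × Int × Int) :=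
  if it.1 = "highlight" ∧ pvLt mp it.2 then (st.1 ++ [it.2], st.2)
  else if it.1 = "mark" ∧ pvLt mp it.2 ∧ st.2 = none then (st.1, some it.2)
  else st

def count_notes_under_mark_py_alt (mark : Int × Int × Int) (all_items : List (String × Int × Int × Int)) : Int :=
  let st := all_items.foldl (pvStepB mark) ([], none)
  st.1.foldl (fun acc p =>
    if (match st.2 with | none => true | some n => pvLt p n) then acc + 1 else acc) 0

-- ===== PRECONDITION & SPEC =====
def Spec_count_notes_under_mark_py (mark : Int × Int × Int) (all_items : List (String × Int × Int × Int)) (out : Int) : Prop := out = count_notes_under_mark_py_alt mark all_items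
instance (mark : Int × Int × Int) (all_items : List (String × Int × Int × Int)) (out : Int) : Decidable (Spec_count_notes_under_mark_py mark all_items out) := by unfold Spec_count_notes_under_mark_py; infer_instance

-- ===== CLAIM (what is proved, stated in full; the proofs are below) =====
def Claim_equal_count_notes_under_mark_py : Prop := ∀ (mark : Int × Int × Int) (all_items : List (String × Int × Int × Int)), Dom_count_notes_under_mark_py mark all_items → Spec_count_notes_under_mark_py mark all_items (count_notes_under_mark_py mark all_items)

-- ===== LEMMAS AND PROOFS =====

-- the qualifying highlight positions, as a filterMap (proof-side characterisation of B's list)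
def pvHighs (mp : Int × Int × Int) (items : List (String × Int × Int × Int)) : List (Int × Int × Int) :=
  items.filterMap (fun it => if it.1 = "highlight" ∧ pvLt mp it.2 then some it.2 else none)

theorem pvHighs_cons (mp : Int × Int × Int) (it : String × Int × Int × Int)
    (rest : List (String × Int × Int × Int)) :
    pvHighs mp (it :: rest) =
      if it.1 = "highlight" ∧ pvLt mp it.2 then it.2 :: pvHighs mp rest else pvHighs mp rest := by
  simp only [pvHighs, List.filterMap_cons]
  split_ifs <;> simp_all

theorem pvStepB_snd_some (mp : Int × Int × Int) (items : List (String × Int × Int × Int))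
    (hl : List (Int × Int × Int)) (n : Int × Int × Int) :
    (items.foldl (pvStepB mp) (hl, some n)).2 = some n := by
  induction items generalizing hl with
  | nil => rfl
  | cons it rest ih =>
    simp only [List.foldl_cons, pvStepB]
    split_ifs with h1 h2
    · exact ih _
    · exact absurd h2.2.2 (by simp)
    · exact ih _

theorem pvStepB_snd (mp : Int × Int × Int) (items : List (String × Int × Int × Int))
    (hl : List (Int × Int × Int)) :
    (items.foldl (pvStepB mp) (hl, none)).2 = pvFindNext mp items := by
  induction items generalizing hl with
  | nil => rfl
  | cons it rest ih =>
    simp only [List.foldl_cons, pvStepB, pvFindNext]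
    by_cases hm : it.1 = "mark"
    · have hh : ¬ it.1 = "highlight" := by simp [hm]
      by_cases heq : it.2 = mp
      · have hlt : pvLt mp mp = false := by simp [pvLt]
        simp [hm, heq, hlt, ih]
      · by_cases hlt : pvLt mp it.2 = true
        · simp [hm, heq, hlt, pvStepB_snd_some]
        · simp at hlt
          simp [hm, heq, hlt, ih]
    · by_cases hh : (it.1 = "highlight" ∧ pvLt mp it.2 = true)
      · simp [hh, ih]
      · rw [if_neg (by simp_all), if_neg (by simp [hm]), if_neg hm]
        exact ih hl

theorem pvStepB_fst (mp : Int × Int × Int) (items : List (String × Int × Int × Int))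
    (hl : List (Int × Int × Int)) (nm : Option (Int × Int × Int)) :
    (items.foldl (pvStepB mp) (hl, nm)).1 = hl ++ pvHighs mp items := by
  induction items generalizing hl nm with
  | nil => simp [pvHighs]
  | cons it rest ih =>
    rw [List.foldl_cons, pvHighs_cons]
    by_cases hh : (it.1 = "highlight" ∧ pvLt mp it.2 = true)
    · rw [if_pos hh]
      show (rest.foldl (pvStepB mp) (pvStepB mp (hl, nm) it)).1 = hl ++ (it.2 :: pvHighs mp rest)
      rw [show pvStepB mp (hl, nm) it = (hl ++ [it.2], nm) from by simp [pvStepB, hh], ih]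
      simp
    · rw [if_neg hh]
      show (rest.foldl (pvStepB mp) (pvStepB mp (hl, nm) it)).1 = hl ++ pvHighs mp rest
      unfold pvStepB
      rw [if_neg hh]
      split_ifs with h2
      · exact ih _ _
      · exact ih _ _

theorem count_eq (mp : Int × Int × Int) (nm : Option (Int × Int × Int))
    (items : List (String × Int × Int × Int)) (acc : Int) :
    items.foldl (fun acc it =>
      if it.1 = "highlight" then
        if pvLt mp it.2 then
          match nm with
          | none => acc + 1
          | some n => if pvLt it.2 n then acc + 1 else acc
        else acc
      else acc) acc
    = (pvHighs mp items).foldl (fun acc p =>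
        if (match nm with | none => true | some n => pvLt p n) then acc + 1 else acc) acc := by
  induction items generalizing acc with
  | nil => rfl
  | cons it rest ih =>
    rw [List.foldl_cons, pvHighs_cons]
    by_cases hh : it.1 = "highlight"
    · by_cases hlt : pvLt mp it.2 = true
      · rw [if_pos (show it.1 = "highlight" ∧ pvLt mp it.2 = true from ⟨hh, hlt⟩)]
        simp only [List.foldl_cons, hh, hlt, if_true]
        cases nm with
        | none => simp [ih]
        | some n =>
          by_cases hn : pvLt it.2 n = true <;> simp [hn, ih]
      · simp [hh, hlt, ih]
    · rw [if_neg (by simp [hh])]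
      simp [hh, ih]

-- ===== VERDICT (by name: the statement is the Claim_ definition above) =====
theorem count_notes_under_mark_py_spec : Claim_equal_count_notes_under_mark_py := by
  intro mark all_items _
  show count_notes_under_mark_py mark all_items = count_notes_under_mark_py_alt mark all_items
  simp only [count_notes_under_mark_py, count_notes_under_mark_py_alt]
  rw [pvStepB_fst, pvStepB_snd, List.nil_append]
  exact count_eq mark (pvFindNext mark all_items) all_items 0
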